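-- pv_equiv track=rewrite | github.com/TsarFox/UMass-STEM-Discord-Bot | src/umassstembot/discord_calendar.py | retrieve_event_id
-- ===== SOURCE A (Python) =====
-- def retrieve_event_id(name, events):
--     """
--     Gets the event id by searching the events for an event matching the name passed in.
--     Returns the event id and the event name with the correct capitalization.
--     """
--     event_id = ''
--     event_name = ''
--     for event in events:
--         if event['summary'].lower() == name.lower():
--             event_id = event['id']
--             event_name = event['summary']
--
--     return event_id, event_name
-- ===== SOURCE B (Python) =====
-- def retrieve_event_id(name, events):
--     target = name.lower()
--     for event in reversed(list(events)):
--         if event['summary'].lower() == target: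
--             return event['id'], event['summary']
--     return '', ''
-- ===== Notes on version B (the rewrite author's own statement) =====
-- stated objective: alternative
-- what changed: B lowercases the name once and scans the list in reverse, returning at the first match (= A's last forward match), instead of A's full forward scan with an overwriting accumulator.
import Mathlib
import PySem

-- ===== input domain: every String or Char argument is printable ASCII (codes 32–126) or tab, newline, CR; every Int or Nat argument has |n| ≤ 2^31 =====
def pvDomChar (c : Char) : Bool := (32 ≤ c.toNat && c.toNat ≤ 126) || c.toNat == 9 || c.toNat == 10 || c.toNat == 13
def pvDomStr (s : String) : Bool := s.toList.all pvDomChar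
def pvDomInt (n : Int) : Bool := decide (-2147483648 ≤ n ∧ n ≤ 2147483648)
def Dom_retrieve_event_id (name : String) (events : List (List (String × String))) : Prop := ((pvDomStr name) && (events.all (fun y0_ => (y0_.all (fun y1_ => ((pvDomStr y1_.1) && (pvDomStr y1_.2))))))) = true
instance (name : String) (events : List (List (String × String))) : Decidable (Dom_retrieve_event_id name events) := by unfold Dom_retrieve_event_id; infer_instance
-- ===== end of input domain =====

-- B scans the events in reverse and returns at the first match (= A's last forward
-- match), with name.lower() computed once, instead of A's full forward scan with an
-- overwriting accumulator. Objective: alternative decomposition (early exit).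

-- ===== PORT A =====
-- A's forward loop: on each matching event overwrite (event_id, event_name).
-- event['summary'] / event['id'] are ported as Dict.getD with default "": Python raises
-- KeyError where the key is missing, and exactly those inputs are excluded by Pre_.
def retrieve_event_id (name : String) (events : List (List (String × String))) : String × String :=
  events.foldl
    (fun acc event =>
      let d := PySem.Dict.ofList event
      if PySem.Str.lower (d.getD "summary" "") == PySem.Str.lower name then
        (d.getD "id" "", d.getD "summary" "")
      else acc)
    ("", "")

-- ===== PORT B =====
-- B's loop: first match in the reversed list, early return.
def pvFindRev (target : String) : List (List (String × String)) → String × String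
  | [] => ("", "")
  | event :: rest =>
    let d := PySem.Dict.ofList event
    if PySem.Str.lower (d.getD "summary" "") == target then
      (d.getD "id" "", d.getD "summary" "")
    else pvFindRev target rest

def retrieve_event_id_alt (name : String) (events : List (List (String × String))) : String × String :=
  pvFindRev (PySem.Str.lower name) events.reverse

-- ===== PRECONDITION & SPEC =====
-- Pre_ excludes exactly the inputs on which Python A raises KeyError: an event without
-- a 'summary' key, or a matching event without an 'id' key.
def Pre_retrieve_event_id (name : String) (events : List (List (String × String))) : Prop :=
  ∀ event ∈ events,
    (PySem.Dict.ofList event).contains "summary" = true ∧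
    (PySem.Str.lower ((PySem.Dict.ofList event).getD "summary" "") = PySem.Str.lower name →
      (PySem.Dict.ofList event).contains "id" = true)
instance (name : String) (events : List (List (String × String))) : Decidable (Pre_retrieve_event_id name events) := by unfold Pre_retrieve_event_id; infer_instance

def pvWitness_retrieve_event_id : String × (List (List (String × String))) :=
  ("Foo", [[("summary", "bar"), ("id", "1")], [("summary", "fOO"), ("id", "2")]])

def Spec_retrieve_event_id (name : String) (events : List (List (String × String))) (out : String × String) : Prop := out = retrieve_event_id_alt name events
instance (name : String) (events : List (List (String × String))) (out : String × String) : Decidable (Spec_retrieve_event_id name events out) := by unfold Spec_retrieve_event_id; infer_instance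

-- ===== CLAIM (what is proved, stated in full; the proofs are below) =====
def Claim_equal_retrieve_event_id : Prop := ∀ (name : String) (events : List (List (String × String))), Dom_retrieve_event_id name events → Pre_retrieve_event_id name events → Spec_retrieve_event_id name events (retrieve_event_id name events)

-- ===== LEMMAS AND PROOFS =====

-- The match predicate and the value extracted on a match.
def pvMatch (target : String) (event : List (String × String)) : Bool :=
  PySem.Str.lower ((PySem.Dict.ofList event).getD "summary" "") == target

def pvVal (event : List (String × String)) : String × String :=
  ((PySem.Dict.ofList event).getD "id" "", (PySem.Dict.ofList event).getD "summary" "")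

-- B's reverse scan is find? + default.
lemma pvFindRev_eq_find? (target : String) (l : List (List (String × String))) :
    pvFindRev target l = ((l.find? (pvMatch target)).map pvVal).getD ("", "") := by
  induction l with
  | nil => rfl
  | cons e rest ih =>
    simp only [pvFindRev, List.find?_cons, pvMatch]
    by_cases h : PySem.Str.lower ((PySem.Dict.ofList e).getD "summary" "") == target
    · simp [h, pvVal]
    · simp only [Bool.not_eq_true] at h
      simp [h, ih]

-- A's forward overwriting fold is the first match of the reversed list (or the accumulator).
lemma pvFold_eq_find?_reverse (target : String) (l : List (List (String × String))) :
    ∀ acc : String × String,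
      l.foldl (fun acc event =>
          if pvMatch target event then pvVal event else acc) acc
        = ((l.reverse.find? (pvMatch target)).map pvVal).getD acc := by
  induction l with
  | nil => intro acc; rfl
  | cons e rest ih =>
    intro acc
    simp only [List.foldl_cons, ih, List.reverse_cons, List.find?_append]
    cases hfind : rest.reverse.find? (pvMatch target) with
    | some x => simp
    | none =>
      simp only [Option.map]
      by_cases h : pvMatch target e
      · simp [List.find?, h]
      · simp only [Bool.not_eq_true] at h
        simp [List.find?, h]

-- ===== VERDICT (by name: the statement is the Claim_ definition above) =====
theorem retrieve_event_id_spec : Claim_equal_retrieve_event_id := by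
  intro name events _ _
  show retrieve_event_id name events = retrieve_event_id_alt name events
  unfold retrieve_event_id retrieve_event_id_alt
  rw [pvFindRev_eq_find? (PySem.Str.lower name) events.reverse]
  rw [show (fun (acc : String × String) (event : List (String × String)) =>
      let d := PySem.Dict.ofList event
      if PySem.Str.lower (d.getD "summary" "") == PySem.Str.lower name then
        (d.getD "id" "", d.getD "summary" "")
      else acc)
    = (fun acc event => if pvMatch (PySem.Str.lower name) event then
        pvVal event else acc) from rfl]
  exact pvFold_eq_find?_reverse (PySem.Str.lower name) events ("", "")
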